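-- pv_equiv track=rewrite | github.com/beskrovniibv/yaintern | training/algorithm/4.0/0. warm-up/f.py | solve
-- ===== SOURCE A (Python) =====
-- def solve(k: int, n: int, a: list[int]) -> int:
--     result = 0
--     max_floor = 0
--     cnt_r = 0
--     for i in range(n - 1, -1, -1):
--         if a[i] == 0:
--             continue
--         result += a[i]//k*2*(i + 1)
--         cnt_r += a[i] % k
--         # if cnt_r == a[i] % k:
--         #     max_floor = i + 1
--         if a[i] % k:
--             max_floor = max_floor if max_floor else i + 1
--         if cnt_r >= k:
--             cnt_r = cnt_r - k
--             # cnt_r = cnt_r % k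
--             result += 2*(max_floor)
--             max_floor = (i + 1) if cnt_r else 0
--     if max_floor:
--         result += 2*(max_floor)
--     return result
-- ===== SOURCE B (Python) =====
-- def solve(k: int, n: int, a: list[int]) -> int:
--     # full k-sized loads, charged per floor
--     total = 0
--     for i in range(n):
--         total += a[i] // k * 2 * (i + 1)
--     # run-length encoding of the leftover passengers, topmost floor first
--     floors = []  # floor numbers, descending
--     pref = []    # pref[j] = number of leftovers on floors[0..j]
--     s = 0
--     for i in range(n - 1, -1, -1):
--         r = a[i] % k
--         if r:
--             floors.append(i + 1)
--             s += r
--             pref.append(s)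
--     # leftover trip b serves the k leftovers starting at virtual position b*k;
--     # it costs twice the floor owning that position, found by binary search
--     for b in range((s + k - 1) // k):
--         t = b * k
--         lo, hi = 0, len(pref) - 1
--         while lo < hi:
--             mid = (lo + hi) // 2
--             if pref[mid] <= t:
--                 lo = mid + 1
--             else:
--                 hi = mid
--         total += 2 * floors[lo]
--     return total
-- ===== Notes on version B (the rewrite author's own statement) =====
-- stated objective: alternative
-- what changed: Replaces A's single backward pass with cnt_r/max_floor counters by a staged pipeline: sum full-load costs, run-length-encode the leftover passengers top-down into (floors, prefix-sum) arrays, then charge each of the ceil(s/k) leftover trips by binary-searching the prefix sums for the floor owning virtual position b*k.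
-- outside the precondition, e.g. on solve(-2, 2, [3, 5]): A returns -6, B returns -10; on solve(0, 1, [0]): A returns 0, B raises ZeroDivisionError
import Mathlib
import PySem

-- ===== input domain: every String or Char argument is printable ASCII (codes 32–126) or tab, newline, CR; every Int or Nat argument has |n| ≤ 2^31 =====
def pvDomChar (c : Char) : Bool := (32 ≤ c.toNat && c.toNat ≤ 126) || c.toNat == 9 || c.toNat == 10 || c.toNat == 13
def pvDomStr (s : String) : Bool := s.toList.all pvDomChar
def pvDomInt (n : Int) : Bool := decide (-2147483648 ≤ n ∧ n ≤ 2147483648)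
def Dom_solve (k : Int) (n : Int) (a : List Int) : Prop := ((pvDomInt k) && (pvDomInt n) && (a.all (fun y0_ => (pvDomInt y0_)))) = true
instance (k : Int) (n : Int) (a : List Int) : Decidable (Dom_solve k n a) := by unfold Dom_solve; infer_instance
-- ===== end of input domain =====

-- B replaces A's one-pass cnt_r/max_floor greedy state machine by a staged pipeline:
-- full-load cost sum, a run-length encoding (floors, prefix sums) of the leftover
-- passengers, then one binary search per leftover trip; same results on Pre_.

-- ===== PORT A =====
-- loop body of A (state: result, max_floor, cnt_r)
def stepA (k : Int) (a : List Int) (st : Int × Int × Int) (i : Int) : Int × Int × Int :=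
  let ai := PySem.List.pyGetD a i 0   -- Pre_ guarantees 0 ≤ i < a.length, so the default is unreachable
  if ai = 0 then st
  else
    let result := st.1 + PySem.Int.floordiv ai k * 2 * (i + 1)
    let cnt_r := st.2.2 + PySem.Int.mod ai k
    let max_floor := if PySem.Int.mod ai k ≠ 0 then (if st.2.1 ≠ 0 then st.2.1 else i + 1) else st.2.1
    if cnt_r ≥ k then
      (result + 2 * max_floor, if cnt_r - k ≠ 0 then i + 1 else 0, cnt_r - k)
    else (result, max_floor, cnt_r)

def solve (k : Int) (n : Int) (a : List Int) : Int :=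
  let st := (PySem.List.pyRange (n - 1) (-1) (-1)).foldl (stepA k a) (0, 0, 0)
  if st.2.1 ≠ 0 then st.1 + 2 * st.2.1 else st.1

-- ===== PORT B =====
-- B's binary-search loop 'while lo < hi: …' (mid written out where Python names it;
-- the fuel argument only makes the loop total: it starts at the interval size, which
-- strictly shrinks each iteration, so the fuel never runs out)
def bsearchAux : Nat → List Int → Int → Int → Int → Int
  | 0, _, _, lo, _ => lo
  | fuel + 1, pref, t, lo, hi =>
    if lo < hi then
      if PySem.List.pyGetD pref (PySem.Int.floordiv (lo + hi) 2) 0 ≤ t then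
        bsearchAux fuel pref t (PySem.Int.floordiv (lo + hi) 2 + 1) hi
      else
        bsearchAux fuel pref t lo (PySem.Int.floordiv (lo + hi) 2)
    else lo

def bsearchGo (pref : List Int) (t : Int) (lo hi : Int) : Int :=
  bsearchAux (hi - lo).toNat pref t lo hi

-- body of B's RLE-building loop (state: floors, pref, s)
def stepC (k : Int) (a : List Int) (st : List Int × List Int × Int) (i : Int) :
    List Int × List Int × Int :=
  let r := PySem.Int.mod (PySem.List.pyGetD a i 0) k
  if r ≠ 0 then (st.1 ++ [i + 1], st.2.1 ++ [st.2.2 + r], st.2.2 + r) else st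

def solve_alt (k : Int) (n : Int) (a : List Int) : Int :=
  let total := (PySem.List.pyRange 0 n 1).foldl
    (fun t i => t + PySem.Int.floordiv (PySem.List.pyGetD a i 0) k * 2 * (i + 1)) 0
  let st := (PySem.List.pyRange (n - 1) (-1) (-1)).foldl (stepC k a) ([], [], 0)
  (PySem.List.pyRange 0 (PySem.Int.floordiv (st.2.2 + k - 1) k) 1).foldl
    (fun tot b =>
      tot + 2 * PySem.List.pyGetD st.1
        (bsearchGo st.2.1 (b * k) 0 ((st.2.1.length : Int) - 1)) 0)
    total

-- ===== PRECONDITION & SPEC =====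
-- Pre_ restricts to the task's natural domain k ≥ 1 (elevator capacity) with n ≤ len(a):
-- A raises IndexError when len(a) < n (and 1 ≤ n) and ZeroDivisionError when k = 0 and some
-- a[i] ≠ 0; for k < 0 (a capacity outside the natural domain) A still returns, but its mixing
-- of floor-division/modulo sign conventions in the greedy state machine yields values no
-- specification would ask for, and B does not mimic them.
def Pre_solve (k : Int) (n : Int) (a : List Int) : Prop := 1 ≤ k ∧ n ≤ (a.length : Int)
instance (k : Int) (n : Int) (a : List Int) : Decidable (Pre_solve k n a) := by unfold Pre_solve; infer_instance
def pvWitness_solve : Int × Int × List Int := (2, 3, [5, 0, 3])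
def Spec_solve (k : Int) (n : Int) (a : List Int) (out : Int) : Prop := out = solve_alt k n a
instance (k : Int) (n : Int) (a : List Int) (out : Int) : Decidable (Spec_solve k n a out) := by unfold Spec_solve; infer_instance

-- ===== CLAIM (what is proved, stated in full; the proofs are below) =====
def Claim_equal_solve : Prop := ∀ (k : Int) (n : Int) (a : List Int), Dom_solve k n a → Pre_solve k n a → Spec_solve k n a (solve k n a)

-- ===== LEMMAS AND PROOFS =====

-- A's loop is compared with this per-floor arithmetic reformulation (proof-only
-- intermediary: charge floor i+1 once per multiple of k inside [s, s+r)).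
def stepB (k : Int) (a : List Int) (st : Int × Int) (i : Int) : Int × Int :=
  let r := PySem.Int.mod (PySem.List.pyGetD a i 0) k
  if r ≠ 0 then
    (st.1 + 2 * (i + 1) * (PySem.Int.floordiv (st.2 + r - 1) k - PySem.Int.floordiv (st.2 - 1) k),
     st.2 + r)
  else st

def altArith (k : Int) (n : Int) (a : List Int) : Int :=
  let total := (PySem.List.pyRange 0 n 1).foldl
    (fun t i => t + PySem.Int.floordiv (PySem.List.pyGetD a i 0) k * 2 * (i + 1)) 0
  ((PySem.List.pyRange (n - 1) (-1) (-1)).foldl (stepB k a) (total, 0)).1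

-- the arithmetic fold is affine in the accumulated total
lemma shiftB (k : Int) (a : List Int) (l : List Int) (t d s : Int) :
    l.foldl (stepB k a) (t + d, s)
      = ((l.foldl (stepB k a) (t, s)).1 + d, (l.foldl (stepB k a) (t, s)).2) := by
  induction l generalizing t s with
  | nil => rfl
  | cons i l ih =>
    simp only [List.foldl_cons, stepB]
    split
    · rw [show t + d + 2 * (i + 1) * (PySem.Int.floordiv (s + PySem.Int.mod (PySem.List.pyGetD a i 0) k - 1) k - PySem.Int.floordiv (s - 1) k)
            = t + 2 * (i + 1) * (PySem.Int.floordiv (s + PySem.Int.mod (PySem.List.pyGetD a i 0) k - 1) k - PySem.Int.floordiv (s - 1) k) + d by ring]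
      exact ih _ _
    · exact ih t s

-- how many multiples of k lie in [s, s+r), for 0 < r < k
lemma block_cnt (k s r : Int) (hk : 0 < k) (h0 : 0 < r) (hrk : r < k) :
    (s + r - 1) / k - (s - 1) / k = if s % k = 0 ∨ k < s % k + r then 1 else 0 := by
  have hkne : k ≠ 0 := hk.ne'
  have hc0 : 0 ≤ s % k := Int.emod_nonneg s hkne
  have hck : s % k < k := Int.emod_lt_of_pos s hk
  have hq : k * (s / k) + s % k = s := Int.ediv_add_emod s k
  by_cases h1 : s % k = 0
  · have hm : k * (s / k - 1) = k * (s / k) - k := by ring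
    have e2 : s - 1 = (k - 1) + k * (s / k - 1) := by omega
    have e3 : s + r - 1 = (r - 1) + k * (s / k) := by omega
    have z1 : (k - 1) / k = 0 := Int.ediv_eq_zero_of_lt (by omega) (by omega)
    have z2 : (r - 1) / k = 0 := Int.ediv_eq_zero_of_lt (by omega) (by omega)
    rw [e2, e3, Int.add_mul_ediv_left _ _ hkne, Int.add_mul_ediv_left _ _ hkne, z1, z2,
        if_pos (Or.inl h1)]
    omega
  · have e2 : s - 1 = (s % k - 1) + k * (s / k) := by omega
    by_cases h2 : k < s % k + r
    · have hm : k * (s / k + 1) = k * (s / k) + k := by ring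
      have e3 : s + r - 1 = (s % k + r - 1 - k) + k * (s / k + 1) := by omega
      have z1 : (s % k - 1) / k = 0 := Int.ediv_eq_zero_of_lt (by omega) (by omega)
      have z2 : (s % k + r - 1 - k) / k = 0 := Int.ediv_eq_zero_of_lt (by omega) (by omega)
      rw [e2, e3, Int.add_mul_ediv_left _ _ hkne, Int.add_mul_ediv_left _ _ hkne, z1, z2,
          if_pos (Or.inr h2)]
      omega
    · have e3 : s + r - 1 = (s % k + r - 1) + k * (s / k) := by omega
      have z1 : (s % k - 1) / k = 0 := Int.ediv_eq_zero_of_lt (by omega) (by omega)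
      have z2 : (s % k + r - 1) / k = 0 := Int.ediv_eq_zero_of_lt (by omega) (by omega)
      rw [e2, e3, Int.add_mul_ediv_left _ _ hkne, Int.add_mul_ediv_left _ _ hkne, z1, z2,
          if_neg (by omega)]
      omega

-- the full-group costs A accumulates inside its loop, as a standalone sum
def divsum (k : Int) (a : List Int) (l : List Int) : Int :=
  (l.map (fun i => PySem.Int.floordiv (PySem.List.pyGetD a i 0) k * 2 * (i + 1))).sum

-- loop invariant: after any prefix of the descent, A's pending partial-block charge
-- 2*max_floor is exactly the head start of the arithmetic fold, and cnt_r = s % k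
lemma loop_eq (k : Int) (hk : 1 ≤ k) (a : List Int) (l : List Int) :
    (∀ i ∈ l, 0 ≤ i) →
    ∀ (res mf s t : Int), 0 ≤ s → (mf = 0 ↔ s % k = 0) →
      res + (if mf = 0 then 0 else 2 * mf) = t →
      (let st := l.foldl (stepA k a) (res, mf, s % k)
       if st.2.1 ≠ 0 then st.1 + 2 * st.2.1 else st.1)
        = (l.foldl (stepB k a) (t, s)).1 + divsum k a l := by
  have hk0 : (0:Int) < k := hk
  have hkne : k ≠ 0 := hk0.ne'
  induction l with
  | nil =>
    intro _ res mf s t hs hmf ht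
    simp only [List.foldl_nil, divsum, List.map_nil, List.sum_nil]
    by_cases h : mf = 0 <;> simp [h] at ht ⊢ <;> omega
  | cons i l ih =>
    intro hl res mf s t hs hmf ht
    have hi : 0 ≤ i := hl i List.mem_cons_self
    have hl' : ∀ j ∈ l, 0 ≤ j := fun j hj => hl j (List.mem_cons_of_mem _ hj)
    have hc0 : 0 ≤ s % k := Int.emod_nonneg s hkne
    have hck : s % k < k := Int.emod_lt_of_pos s hk0
    have hq : k * (s / k) + s % k = s := Int.ediv_add_emod s k
    have hdsum : divsum k a (i :: l)
        = PySem.Int.floordiv (PySem.List.pyGetD a i 0) k * 2 * (i + 1) + divsum k a l := by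
      simp [divsum]
    simp only [List.foldl_cons]
    by_cases ha : PySem.List.pyGetD a i 0 = 0
    · -- a[i] == 0: A skips the floor, the remainder is 0
      have hmod0 : PySem.Int.mod (PySem.List.pyGetD a i 0) k = 0 := by
        rw [ha, PySem.Int.mod_eq_emod_of_pos hk0]; simp
      have hdiv0 : PySem.Int.floordiv (PySem.List.pyGetD a i 0) k = 0 := by
        rw [ha, PySem.Int.floordiv_eq_ediv_of_pos hk0]; simp
      have hA : stepA k a (res, mf, s % k) i = (res, mf, s % k) := by
        simp [stepA, ha]
      have hB : stepB k a (t, s) i = (t, s) := by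
        simp [stepB, hmod0]
      rw [hA, hB, hdsum, hdiv0, ih hl' res mf s t hs hmf ht]
      ring
    · have hmodE : PySem.Int.mod (PySem.List.pyGetD a i 0) k = PySem.List.pyGetD a i 0 % k :=
        PySem.Int.mod_eq_emod_of_pos hk0
      have hr1 : 0 ≤ PySem.List.pyGetD a i 0 % k := Int.emod_nonneg _ hkne
      have hr2 : PySem.List.pyGetD a i 0 % k < k := Int.emod_lt_of_pos _ hk0
      by_cases hr0 : PySem.List.pyGetD a i 0 % k = 0
      · -- remainder zero: A adds only the full-group cost, the fold skips
        have hmod0 : PySem.Int.mod (PySem.List.pyGetD a i 0) k = 0 := by rw [hmodE, hr0]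
        have hA : stepA k a (res, mf, s % k) i
            = (res + PySem.Int.floordiv (PySem.List.pyGetD a i 0) k * 2 * (i + 1), mf, s % k) := by
          simp [stepA, ha, hmod0]
          intro h
          exact absurd h (by omega)
        have hB : stepB k a (t, s) i = (t, s) := by simp [stepB, hmod0]
        rw [hA, hB, hdsum]
        rw [ih hl' _ mf s (t + PySem.Int.floordiv (PySem.List.pyGetD a i 0) k * 2 * (i + 1)) hs hmf
            (by by_cases h : mf = 0 <;> simp [h] at ht ⊢ <;> omega)]
        rw [shiftB]
        ring
      · -- remainder r > 0
        have hrpos : 0 < PySem.List.pyGetD a i 0 % k := by omega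
        have hB : stepB k a (t, s) i
            = (t + 2 * (i + 1) * (if s % k = 0 ∨ k < s % k + PySem.List.pyGetD a i 0 % k then 1 else 0),
               s + PySem.List.pyGetD a i 0 % k) := by
          simp only [stepB, hmodE]
          rw [if_pos (by exact hr0), PySem.Int.floordiv_eq_ediv_of_pos hk0,
              PySem.Int.floordiv_eq_ediv_of_pos hk0,
              block_cnt k s _ hk0 hrpos hr2]
        by_cases hge : k ≤ s % k + PySem.List.pyGetD a i 0 % k
        · -- a block completes at this floor: A pays 2*max_floor now
          have hcne : s % k ≠ 0 := by omega
          have hmfne : mf ≠ 0 := fun h => hcne (hmf.mp h)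
          have hA : stepA k a (res, mf, s % k) i
              = (res + PySem.Int.floordiv (PySem.List.pyGetD a i 0) k * 2 * (i + 1) + 2 * mf,
                 if s % k + PySem.List.pyGetD a i 0 % k - k ≠ 0 then i + 1 else 0,
                 s % k + PySem.List.pyGetD a i 0 % k - k) := by
            simp only [stepA, hmodE]
            rw [if_neg ha, if_pos (show s % k + PySem.List.pyGetD a i 0 % k ≥ k by omega),
                if_pos (show PySem.List.pyGetD a i 0 % k ≠ 0 from hr0), if_pos hmfne]
          have hsr : (s + PySem.List.pyGetD a i 0 % k) % k
              = s % k + PySem.List.pyGetD a i 0 % k - k := by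
            have hm : k * (s / k + 1) = k * (s / k) + k := by ring
            have e : s + PySem.List.pyGetD a i 0 % k
                = (s % k + PySem.List.pyGetD a i 0 % k - k) + k * (s / k + 1) := by omega
            rw [e, Int.add_mul_emod_self_left, Int.emod_eq_of_lt (by omega) (by omega)]
          have hIH := ih hl'
            (res + PySem.Int.floordiv (PySem.List.pyGetD a i 0) k * 2 * (i + 1) + 2 * mf)
            (if s % k + PySem.List.pyGetD a i 0 % k - k ≠ 0 then i + 1 else 0)
            (s + PySem.List.pyGetD a i 0 % k)
            (t + PySem.Int.floordiv (PySem.List.pyGetD a i 0) k * 2 * (i + 1)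
               + 2 * (i + 1) * (if s % k = 0 ∨ k < s % k + PySem.List.pyGetD a i 0 % k then 1 else 0))
            (by omega)
            (by rw [hsr]; by_cases h : s % k + PySem.List.pyGetD a i 0 % k - k = 0 <;> simp [h] <;> omega)
            (by
              rw [if_neg hmfne] at ht
              by_cases h : s % k + PySem.List.pyGetD a i 0 % k - k = 0
              · have e1 : (if s % k + PySem.List.pyGetD a i 0 % k - k ≠ 0 then i + 1 else (0:Int)) = 0 := by
                  simp [h]
                have e2 : (if s % k = 0 ∨ k < s % k + PySem.List.pyGetD a i 0 % k then (1:Int) else 0) = 0 := by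
                  rw [if_neg (not_or.mpr ⟨hcne, by omega⟩)]
                rw [e1, e2, if_pos rfl]
                omega
              · have e1 : (if s % k + PySem.List.pyGetD a i 0 % k - k ≠ 0 then i + 1 else (0:Int)) = i + 1 := by
                  simp [h]
                have e2 : (if s % k = 0 ∨ k < s % k + PySem.List.pyGetD a i 0 % k then (1:Int) else 0) = 1 :=
                  if_pos (Or.inr (by omega))
                rw [e1, e2, if_neg (show ¬ (i + 1 = (0:Int)) by omega)]
                omega)
          rw [hA, hB]
          rw [hsr] at hIH
          rw [hIH, hdsum]
          rw [show t + PySem.Int.floordiv (PySem.List.pyGetD a i 0) k * 2 * (i + 1)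
               + 2 * (i + 1) * (if s % k = 0 ∨ k < s % k + PySem.List.pyGetD a i 0 % k then 1 else 0)
             = (t + 2 * (i + 1) * (if s % k = 0 ∨ k < s % k + PySem.List.pyGetD a i 0 % k then 1 else 0))
               + PySem.Int.floordiv (PySem.List.pyGetD a i 0) k * 2 * (i + 1) by ring]
          rw [shiftB]
          ring
        · -- no block completes: A only updates max_floor
          have hA : stepA k a (res, mf, s % k) i
              = (res + PySem.Int.floordiv (PySem.List.pyGetD a i 0) k * 2 * (i + 1),
                 if mf ≠ 0 then mf else i + 1,
                 s % k + PySem.List.pyGetD a i 0 % k) := by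
            simp only [stepA, hmodE]
            rw [if_neg ha, if_neg (show ¬ (s % k + PySem.List.pyGetD a i 0 % k ≥ k) by omega),
                if_pos (show PySem.List.pyGetD a i 0 % k ≠ 0 from hr0)]
          have hsr : (s + PySem.List.pyGetD a i 0 % k) % k
              = s % k + PySem.List.pyGetD a i 0 % k := by
            have e : s + PySem.List.pyGetD a i 0 % k
                = (s % k + PySem.List.pyGetD a i 0 % k) + k * (s / k) := by omega
            rw [e, Int.add_mul_emod_self_left, Int.emod_eq_of_lt (by omega) (by omega)]
          have hIH := ih hl'
            (res + PySem.Int.floordiv (PySem.List.pyGetD a i 0) k * 2 * (i + 1))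
            (if mf ≠ 0 then mf else i + 1)
            (s + PySem.List.pyGetD a i 0 % k)
            (t + PySem.Int.floordiv (PySem.List.pyGetD a i 0) k * 2 * (i + 1)
               + 2 * (i + 1) * (if s % k = 0 ∨ k < s % k + PySem.List.pyGetD a i 0 % k then 1 else 0))
            (by omega)
            (by rw [hsr]; by_cases h : mf = 0 <;> simp [h] <;> omega)
            (by
              by_cases h : mf = 0
              · have e0 : (if mf ≠ 0 then mf else i + 1) = i + 1 := by simp [h]
                have e2 : (if s % k = 0 ∨ k < s % k + PySem.List.pyGetD a i 0 % k then (1:Int) else 0) = 1 :=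
                  if_pos (Or.inl (hmf.mp h))
                rw [if_pos h] at ht
                rw [e0, e2, if_neg (show ¬ (i + 1 = (0:Int)) by omega)]
                omega
              · have e0 : (if mf ≠ 0 then mf else i + 1) = mf := by simp [h]
                have e2 : (if s % k = 0 ∨ k < s % k + PySem.List.pyGetD a i 0 % k then (1:Int) else 0) = 0 := by
                  rw [if_neg (not_or.mpr ⟨fun hc => h (hmf.mpr hc), by omega⟩)]
                rw [if_neg h] at ht
                rw [e0, e2, if_neg h]
                omega)
          rw [hA, hB]
          rw [hsr] at hIH
          rw [hIH, hdsum]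
          rw [show t + PySem.Int.floordiv (PySem.List.pyGetD a i 0) k * 2 * (i + 1)
               + 2 * (i + 1) * (if s % k = 0 ∨ k < s % k + PySem.List.pyGetD a i 0 % k then 1 else 0)
             = (t + 2 * (i + 1) * (if s % k = 0 ∨ k < s % k + PySem.List.pyGetD a i 0 % k then 1 else 0))
               + PySem.Int.floordiv (PySem.List.pyGetD a i 0) k * 2 * (i + 1) by ring]
          rw [shiftB]
          ring

lemma loop_main (k n : Int) (a : List Int) (hk : 1 ≤ k) : solve k n a = altArith k n a := by
  have hmem : ∀ i ∈ PySem.List.pyRange (n - 1) (-1) (-1), 0 ≤ i := by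
    intro i hi
    rw [PySem.List.mem_pyRange_neg_one] at hi
    omega
  have hz : (0:Int) % k = 0 := Int.zero_emod k
  have hmain := loop_eq k hk a (PySem.List.pyRange (n - 1) (-1) (-1)) hmem 0 0 0 0 le_rfl
    (by simp [hz]) (by simp)
  rw [hz] at hmain
  have hdiv : divsum k a (PySem.List.pyRange (n - 1) (-1) (-1))
      = (PySem.List.pyRange 0 n 1).foldl
          (fun t i => t + PySem.Int.floordiv (PySem.List.pyGetD a i 0) k * 2 * (i + 1)) 0 := by
    rw [PySem.List.foldl_add]
    have hrev : PySem.List.pyRange (n - 1) (-1) (-1) = (PySem.List.pyRange 0 n 1).reverse := by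
      have h := PySem.List.pyRange_neg_one_eq_reverse (n - 1) (-1)
      simpa using h
    rw [divsum, hrev, List.map_reverse, List.sum_reverse]
    ring
  have hshift := shiftB k a (PySem.List.pyRange (n - 1) (-1) (-1)) 0
    ((PySem.List.pyRange 0 n 1).foldl
       (fun t i => t + PySem.Int.floordiv (PySem.List.pyGetD a i 0) k * 2 * (i + 1)) 0) 0
  simp only [zero_add] at hshift
  rw [← hdiv] at hshift
  unfold solve altArith
  simp only [hmain, ← hdiv, hshift]

-- ---- the virtual list of leftover passengers (proof-only) ----
def vrep (k : Int) (a : List Int) (i : Int) : List Int :=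
  List.replicate (PySem.Int.mod (PySem.List.pyGetD a i 0) k).toNat (i + 1)

def vflat (k : Int) (a : List Int) (l : List Int) : List Int := l.flatMap (vrep k a)

-- structural forms of the three RLE accumulators B builds
def rleF (k : Int) (a : List Int) : List Int → List Int
  | [] => []
  | i :: l => if PySem.Int.mod (PySem.List.pyGetD a i 0) k ≠ 0
              then (i + 1) :: rleF k a l else rleF k a l

def rleP (k : Int) (a : List Int) : Int → List Int → List Int
  | _, [] => []
  | s, i :: l =>
    if PySem.Int.mod (PySem.List.pyGetD a i 0) k ≠ 0
    then (s + PySem.Int.mod (PySem.List.pyGetD a i 0) k)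
           :: rleP k a (s + PySem.Int.mod (PySem.List.pyGetD a i 0) k) l
    else rleP k a s l

def rleS (k : Int) (a : List Int) : List Int → Int
  | [] => 0
  | i :: l => PySem.Int.mod (PySem.List.pyGetD a i 0) k + rleS k a l

lemma build_eq (k : Int) (a : List Int) (l : List Int) : ∀ (fs ps : List Int) (s : Int),
    l.foldl (stepC k a) (fs, ps, s) = (fs ++ rleF k a l, ps ++ rleP k a s l, s + rleS k a l) := by
  induction l with
  | nil => intro fs ps s; simp [rleF, rleP, rleS]
  | cons i l ih =>
    intro fs ps s
    by_cases h : PySem.Int.mod (PySem.List.pyGetD a i 0) k ≠ 0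
    · simp [List.foldl_cons, stepC, rleF, rleP, rleS, h, ih, List.append_assoc, add_assoc]
    · push_neg at h
      simp [List.foldl_cons, stepC, rleF, rleP, rleS, h, ih]

-- which floor owns virtual position t, read from the RLE pair
def pvOwn : List Int → List Int → Int → Int
  | f :: fs, p :: ps, t => if t < p then f else pvOwn fs ps t
  | _, _, _ => 0

-- sum of the virtual-list entries whose global position is a multiple of K
def pvStride (K : Nat) : Nat → List Int → Int
  | _, [] => 0
  | off, x :: xs => (if off % K = 0 then x else 0) + pvStride K (off + 1) xs

lemma rleS_nonneg (k : Int) (a : List Int) (hk : 0 < k) (l : List Int) : 0 ≤ rleS k a l := by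
  induction l with
  | nil => simp [rleS]
  | cons i l ih =>
    have := PySem.Int.mod_nonneg (PySem.List.pyGetD a i 0) hk
    simp only [rleS]
    omega

lemma rleS_eq_len (k : Int) (a : List Int) (hk : 0 < k) (l : List Int) :
    rleS k a l = ((vflat k a l).length : Int) := by
  induction l with
  | nil => simp [rleS, vflat]
  | cons i l ih =>
    have h0 := PySem.Int.mod_nonneg (PySem.List.pyGetD a i 0) hk
    simp only [rleS, vflat, List.flatMap_cons, List.length_append, vrep, List.length_replicate]
    push_cast [Int.toNat_of_nonneg h0]
    rw [ih]
    simp [vflat]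

lemma len_rleF_eq (k : Int) (a : List Int) (l : List Int) : ∀ s : Int,
    (rleF k a l).length = (rleP k a s l).length := by
  induction l with
  | nil => intro s; simp [rleF, rleP]
  | cons i l ih =>
    intro s
    by_cases h : PySem.Int.mod (PySem.List.pyGetD a i 0) k ≠ 0
    · simp only [rleF, rleP, if_pos h, List.length_cons]
      rw [ih]
    · simp only [rleF, rleP, if_neg h]
      exact ih _

lemma rleP_lb (k : Int) (a : List Int) (hk : 0 < k) (l : List Int) : ∀ (s x : Int),
    x ∈ rleP k a s l → s < x := by
  induction l with
  | nil => intro s x hx; simp [rleP] at hx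
  | cons i l ih =>
    intro s x hx
    have h0 := PySem.Int.mod_nonneg (PySem.List.pyGetD a i 0) hk
    by_cases h : PySem.Int.mod (PySem.List.pyGetD a i 0) k ≠ 0
    · rw [rleP, if_pos h] at hx
      rcases List.mem_cons.mp hx with h1 | h1
      · omega
      · have := ih _ _ h1
        omega
    · rw [rleP, if_neg h] at hx
      exact ih _ _ hx

lemma rleP_sorted (k : Int) (a : List Int) (hk : 0 < k) (l : List Int) : ∀ s : Int,
    (rleP k a s l).Pairwise (· < ·) := by
  induction l with
  | nil => intro s; simp [rleP]
  | cons i l ih =>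
    intro s
    by_cases h : PySem.Int.mod (PySem.List.pyGetD a i 0) k ≠ 0
    · rw [rleP, if_pos h]
      exact List.pairwise_cons.mpr ⟨fun x hx => rleP_lb k a hk l _ x hx, ih _⟩
    · rw [rleP, if_neg h]
      exact ih _

lemma rleP_exists (k : Int) (a : List Int) (hk : 0 < k) (l : List Int) : ∀ (s t : Int),
    s ≤ t → t < s + rleS k a l → ∃ p ∈ rleP k a s l, t < p := by
  induction l with
  | nil => intro s t hst h; simp [rleS] at h; omega
  | cons i l ih =>
    intro s t hst h
    have h0 := PySem.Int.mod_nonneg (PySem.List.pyGetD a i 0) hk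
    rw [rleS] at h
    by_cases hr : PySem.Int.mod (PySem.List.pyGetD a i 0) k ≠ 0
    · rw [rleP, if_pos hr]
      by_cases ht : t < s + PySem.Int.mod (PySem.List.pyGetD a i 0) k
      · exact ⟨_, List.mem_cons_self, ht⟩
      · obtain ⟨p, hp, htp⟩ := ih (s + PySem.Int.mod (PySem.List.pyGetD a i 0) k) t
          (by omega) (by omega)
        exact ⟨p, List.mem_cons_of_mem _ hp, htp⟩
    · push_neg at hr
      rw [rleP, if_neg (by simp [hr])]
      exact ih s t hst (by omega)

lemma own_vflat (k : Int) (a : List Int) (hk : 0 < k) (l : List Int) : ∀ (s t : Int),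
    0 ≤ s → s ≤ t → t < s + rleS k a l →
    pvOwn (rleF k a l) (rleP k a s l) t = (vflat k a l).getD (t - s).toNat 0 := by
  induction l with
  | nil => intro s t _ _ h; rw [rleS] at h; omega
  | cons i l ih =>
    intro s t hs hst h
    have h0 := PySem.Int.mod_nonneg (PySem.List.pyGetD a i 0) hk
    rw [rleS] at h
    have hv : vflat k a (i :: l)
        = List.replicate (PySem.Int.mod (PySem.List.pyGetD a i 0) k).toNat (i + 1)
            ++ vflat k a l := by
      simp [vflat, vrep]
    by_cases hr : PySem.Int.mod (PySem.List.pyGetD a i 0) k ≠ 0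
    · simp only [rleF, rleP, if_pos hr]
      rw [hv]
      by_cases ht : t < s + PySem.Int.mod (PySem.List.pyGetD a i 0) k
      · rw [pvOwn, if_pos ht]
        rw [List.getD_eq_getElem?_getD,
            List.getElem?_append_left (by rw [List.length_replicate]; omega),
            List.getElem?_replicate, if_pos (by omega)]
        rfl
      · rw [pvOwn, if_neg ht]
        rw [List.getD_eq_getElem?_getD,
            List.getElem?_append_right (by rw [List.length_replicate]; omega),
            List.length_replicate]
        rw [show (t - s).toNat - (PySem.Int.mod (PySem.List.pyGetD a i 0) k).toNat
              = (t - (s + PySem.Int.mod (PySem.List.pyGetD a i 0) k)).toNat by omega]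
        rw [← List.getD_eq_getElem?_getD]
        exact ih (s + PySem.Int.mod (PySem.List.pyGetD a i 0) k) t (by omega) (by omega) (by omega)
    · push_neg at hr
      simp only [rleF, rleP, if_neg (by simp [hr] : ¬ PySem.Int.mod (PySem.List.pyGetD a i 0) k ≠ 0)]
      rw [hv, hr]
      simp only [Int.toNat_zero, List.replicate_zero, List.nil_append]
      exact ih s t hs hst (by omega)

lemma own_eq_getD (t : Int) (ps : List Int) : ∀ (fs : List Int) (j : Nat),
    fs.length = ps.length → j < ps.length → (∀ m : Nat, m < j → ps.getD m 0 ≤ t) →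
    t < ps.getD j 0 → pvOwn fs ps t = fs.getD j 0 := by
  induction ps with
  | nil => intro fs j _ hj; simp at hj
  | cons p ps ih =>
    intro fs j hlen hj hlow hup
    cases fs with
    | nil => simp at hlen
    | cons f fs =>
      cases j with
      | zero =>
        simp only [List.getD_cons_zero] at hup ⊢
        simp [pvOwn, hup]
      | succ j =>
        have hp : p ≤ t := by simpa using hlow 0 (Nat.succ_pos j)
        simp only [List.getD_cons_succ] at hup ⊢
        rw [pvOwn, if_neg (by omega)]
        exact ih fs j (by simpa using hlen) (by simpa using hj)
          (fun m hm => by simpa using hlow (m + 1) (by omega)) hup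

lemma sorted_getD_le (ps : List Int) (h : ps.Pairwise (· < ·)) (m j : Nat)
    (hmj : m ≤ j) (hj : j < ps.length) : ps.getD m 0 ≤ ps.getD j 0 := by
  rcases Nat.lt_or_ge m j with hlt | hge
  · rw [List.getD_eq_getElem ps 0 (by omega), List.getD_eq_getElem ps 0 hj]
    exact le_of_lt (List.pairwise_iff_getElem.mp h m j (by omega) hj hlt)
  · have : m = j := by omega
    rw [this]

lemma bsearchAux_own (t : Int) (fs ps : List Int) (hlen : fs.length = ps.length)
    (hs : ps.Pairwise (· < ·)) : ∀ (N : Nat) (lo hi : Int), (hi - lo).toNat ≤ N →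
    0 ≤ lo → lo ≤ hi → hi < (ps.length : Int) →
    (∀ m : Nat, (m : Int) < lo → ps.getD m 0 ≤ t) → t < ps.getD hi.toNat 0 →
    PySem.List.pyGetD fs (bsearchAux N ps t lo hi) 0 = pvOwn fs ps t := by
  intro N
  induction N with
  | zero =>
    intro lo hi hN h0 hlh hhi hlow hup
    have heq : lo = hi := by omega
    rw [bsearchAux]
    rw [PySem.List.pyGetD_eq_getElem fs 0 h0 (by rw [hlen]; omega),
        ← List.getD_eq_getElem fs 0]
    exact (own_eq_getD t ps fs lo.toNat hlen (by omega)
      (fun m hm => hlow m (by omega)) (by rw [heq]; exact hup)).symm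
  | succ N ih =>
    intro lo hi hN h0 hlh hhi hlow hup
    rw [bsearchAux]
    by_cases hlt : lo < hi
    · rw [if_pos hlt]
      have hfd : PySem.Int.floordiv (lo + hi) 2 = (lo + hi) / 2 :=
        PySem.Int.floordiv_eq_ediv_of_pos (by norm_num)
      have hmlo : lo ≤ (lo + hi) / 2 := by omega
      have hmhi : (lo + hi) / 2 < hi := by omega
      have hMeq : PySem.List.pyGetD ps ((lo + hi) / 2) 0 = ps.getD ((lo + hi) / 2).toNat 0 := by
        rw [PySem.List.pyGetD_eq_getElem ps 0 (by omega) (by omega),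
            ← List.getD_eq_getElem ps 0]
      rw [hfd]
      by_cases hc : PySem.List.pyGetD ps ((lo + hi) / 2) 0 ≤ t
      · rw [if_pos hc]
        refine ih ((lo + hi) / 2 + 1) hi (by omega) (by omega) (by omega) hhi ?_ hup
        intro m hm
        rcases lt_or_ge (m : Int) lo with hml | hml
        · exact hlow m hml
        · have hle : ps.getD m 0 ≤ ps.getD ((lo + hi) / 2).toNat 0 :=
            sorted_getD_le ps hs m ((lo + hi) / 2).toNat (by omega) (by omega)
          rw [hMeq] at hc
          omega
      · rw [if_neg hc]
        refine ih lo ((lo + hi) / 2) (by omega) h0 (by omega) (by omega) hlow ?_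
        rw [hMeq] at hc
        omega
    · rw [if_neg hlt]
      have heq : lo = hi := by omega
      rw [PySem.List.pyGetD_eq_getElem fs 0 h0 (by rw [hlen]; omega),
          ← List.getD_eq_getElem fs 0]
      exact (own_eq_getD t ps fs lo.toNat hlen (by omega)
        (fun m hm => hlow m (by omega)) (by rw [heq]; exact hup)).symm

lemma bsearch_own (t : Int) (fs ps : List Int) (hlen : fs.length = ps.length)
    (hs : ps.Pairwise (· < ·)) (lo hi : Int) (h0 : 0 ≤ lo) (hlh : lo ≤ hi)
    (hhi : hi < (ps.length : Int)) (hlow : ∀ m : Nat, (m : Int) < lo → ps.getD m 0 ≤ t)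
    (hup : t < ps.getD hi.toNat 0) :
    PySem.List.pyGetD fs (bsearchGo ps t lo hi) 0 = pvOwn fs ps t := by
  rw [bsearchGo]
  exact bsearchAux_own t fs ps hlen hs ((hi - lo).toNat) lo hi le_rfl h0 hlh hhi hlow hup

lemma stride_congr (K : Nat) (xs : List Int) : ∀ (o1 o2 : Nat), o1 % K = o2 % K →
    pvStride K o1 xs = pvStride K o2 xs := by
  induction xs with
  | nil => intro o1 o2 _; rfl
  | cons x xs ih =>
    intro o1 o2 h
    simp only [pvStride, h]
    rw [ih (o1 + 1) (o2 + 1) (by rw [Nat.add_mod o1, Nat.add_mod o2, h])]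

lemma stride_append (K : Nat) (xs ys : List Int) : ∀ off : Nat,
    pvStride K off (xs ++ ys) = pvStride K off xs + pvStride K (off + xs.length) ys := by
  induction xs with
  | nil => intro off; simp [pvStride]
  | cons x xs ih =>
    intro off
    simp only [List.cons_append, pvStride, ih (off + 1), List.length_cons]
    have : off + 1 + xs.length = off + (xs.length + 1) := by omega
    rw [this, add_assoc]

lemma stride_shift (K : Nat) (hK : 0 < K) : ∀ (d j : Nat), j + d = K → 1 ≤ j → ∀ xs : List Int,
    pvStride K j xs = pvStride K 0 (xs.drop d) := by
  intro d
  induction d with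
  | zero =>
    intro j hjd _ xs
    rw [List.drop_zero]
    have hjK : j = K := by omega
    exact stride_congr K xs j 0 (by simp [hjK, Nat.mod_self])
  | succ d ih =>
    intro j hjd hj xs
    cases xs with
    | nil => simp [pvStride]
    | cons x xs =>
      have hjK : j < K := by omega
      rw [pvStride, if_neg (by rw [Nat.mod_eq_of_lt hjK]; omega), zero_add]
      rw [List.drop_succ_cons]
      exact ih (j + 1) (by omega) (by omega) xs

lemma div_step (k : Int) (hk : 0 < k) (m : Int) :
    m / k - (m - 1) / k = if m % k = 0 then 1 else 0 := by
  have hkne : k ≠ 0 := hk.ne'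
  have hc0 : 0 ≤ m % k := Int.emod_nonneg m hkne
  have hck : m % k < k := Int.emod_lt_of_pos m hk
  have hq : k * (m / k) + m % k = m := Int.ediv_add_emod m k
  by_cases h1 : m % k = 0
  · have hm : k * (m / k - 1) = k * (m / k) - k := by ring
    have e2 : m - 1 = (k - 1) + k * (m / k - 1) := by omega
    have z1 : (k - 1) / k = 0 := Int.ediv_eq_zero_of_lt (by omega) (by omega)
    rw [e2, Int.add_mul_ediv_left _ _ hkne, z1, if_pos h1]
    omega
  · have e2 : m - 1 = (m % k - 1) + k * (m / k) := by omega
    have z1 : (m % k - 1) / k = 0 := Int.ediv_eq_zero_of_lt (by omega) (by omega)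
    rw [e2, Int.add_mul_ediv_left _ _ hkne, z1, if_neg h1]
    omega

lemma stride_replicate (K : Nat) (hK : 0 < K) (v : Int) : ∀ (r off : Nat),
    pvStride K off (List.replicate r v)
      = v * (((off : Int) + (r : Int) - 1) / (K : Int) - ((off : Int) - 1) / (K : Int)) := by
  intro r
  induction r with
  | zero =>
    intro off
    rw [show ((off : Int) + ((0:ℕ) : Int) - 1) = (off : Int) - 1 by push_cast; ring]
    simp [pvStride]
  | succ r ih =>
    intro off
    rw [List.replicate_succ, pvStride, ih (off + 1)]
    have hks : (0:Int) < (K:Int) := by exact_mod_cast hK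
    have hstep := div_step (K:Int) hks (off:Int)
    have hiff : ((off:Int) % (K:Int) = 0) ↔ off % K = 0 := by
      rw [← Int.natCast_mod]
      exact_mod_cast Iff.rfl
    rw [show (((off + 1 : ℕ)) : Int) + ((r:ℕ) : Int) - 1 = (off : Int) + (r : Int) by push_cast; ring]
    rw [show (((off + 1 : ℕ)) : Int) - 1 = (off : Int) by push_cast; ring]
    rw [show ((off : Int) + ((r + 1 : ℕ) : Int) - 1) = (off : Int) + (r : Int) by push_cast; ring]
    by_cases h : off % K = 0
    · rw [if_pos h]
      have h1 : (off:Int)/(K:Int) - ((off:Int)-1)/(K:Int) = 1 := by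
        rw [hstep, if_pos (hiff.mpr h)]
      linear_combination (-v) * h1
    · rw [if_neg h]
      have h1 : (off:Int)/(K:Int) - ((off:Int)-1)/(K:Int) = 0 := by
        rw [hstep, if_neg (fun hc => h (hiff.mp hc))]
      linear_combination (-v) * h1

lemma stepB_fold_stride (k : Int) (a : List Int) (hk : 1 ≤ k) (l : List Int) : ∀ (s t : Int),
    0 ≤ s → (l.foldl (stepB k a) (t, s)).1 = t + 2 * pvStride k.toNat s.toNat (vflat k a l) := by
  have hk0 : (0:Int) < k := hk
  have hKpos : 0 < k.toNat := by omega
  have hkk : ((k.toNat : ℕ) : Int) = k := Int.toNat_of_nonneg (by omega)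
  induction l with
  | nil => intro s t _; simp [vflat, pvStride]
  | cons i l ih =>
    intro s t hs
    have h0 := PySem.Int.mod_nonneg (PySem.List.pyGetD a i 0) hk0
    have h1 := PySem.Int.mod_lt (PySem.List.pyGetD a i 0) hk0
    have hv : vflat k a (i :: l)
        = List.replicate (PySem.Int.mod (PySem.List.pyGetD a i 0) k).toNat (i + 1)
            ++ vflat k a l := by
      simp [vflat, vrep]
    rw [List.foldl_cons]
    by_cases hr : PySem.Int.mod (PySem.List.pyGetD a i 0) k ≠ 0
    · have hB : stepB k a (t, s) i
          = (t + 2 * (i + 1) * (PySem.Int.floordiv (s + PySem.Int.mod (PySem.List.pyGetD a i 0) k - 1) k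
               - PySem.Int.floordiv (s - 1) k),
             s + PySem.Int.mod (PySem.List.pyGetD a i 0) k) := by
        simp [stepB, hr]
      rw [hB, ih _ _ (by omega), hv, stride_append, List.length_replicate,
          stride_replicate k.toNat hKpos]
      have hst : ((s.toNat : ℕ) : Int) = s := Int.toNat_of_nonneg hs
      have hrt : (((PySem.Int.mod (PySem.List.pyGetD a i 0) k).toNat : ℕ) : Int)
          = PySem.Int.mod (PySem.List.pyGetD a i 0) k := Int.toNat_of_nonneg h0
      have hsr : (s + PySem.Int.mod (PySem.List.pyGetD a i 0) k).toNat
          = s.toNat + (PySem.Int.mod (PySem.List.pyGetD a i 0) k).toNat := by omega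
      rw [hsr, hst, hrt, hkk,
          PySem.Int.floordiv_eq_ediv_of_pos hk0, PySem.Int.floordiv_eq_ediv_of_pos hk0]
      ring
    · push_neg at hr
      have hB : stepB k a (t, s) i = (t, s) := by simp [stepB, hr]
      rw [hB, ih s t hs, hv, hr]
      simp

lemma blocksum_stride (K : Nat) (hK : 0 < K) : ∀ (N : Nat) (V : List Int), V.length ≤ N →
    ((List.range ((V.length + K - 1) / K)).map (fun b => V.getD (K * b) 0)).sum
      = pvStride K 0 V := by
  obtain ⟨K', rfl⟩ : ∃ K', K = K' + 1 := ⟨K - 1, by omega⟩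
  intro N
  induction N with
  | zero =>
    intro V hV
    have hVnil : V = [] := List.eq_nil_of_length_eq_zero (by omega)
    subst hVnil
    simp [pvStride, Nat.div_eq_of_lt (by omega : K' < K' + 1)]
  | succ N ih =>
    intro V hV
    cases V with
    | nil => simp [pvStride, Nat.div_eq_of_lt (by omega : K' < K' + 1)]
    | cons x xs =>
      have hcnt : ((x :: xs).length + (K' + 1) - 1) / (K' + 1) = xs.length / (K' + 1) + 1 := by
        rw [List.length_cons, show xs.length + 1 + (K' + 1) - 1 = xs.length + (K' + 1) by omega,
            Nat.add_div_right _ (Nat.succ_pos K')]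
      have hc2 : ((xs.drop K').length + (K' + 1) - 1) / (K' + 1) = xs.length / (K' + 1) := by
        rw [List.length_drop]
        by_cases hle : K' ≤ xs.length
        · rw [show xs.length - K' + (K' + 1) - 1 = xs.length - K' + K' by omega,
              Nat.sub_add_cancel hle]
        · rw [show xs.length - K' = 0 by omega,
              Nat.div_eq_of_lt (by omega), Nat.div_eq_of_lt (by omega)]
      rw [hcnt, List.range_succ_eq_map, List.map_cons, List.sum_cons, List.map_map]
      have hfun : ∀ b ∈ List.range (xs.length / (K' + 1)),
          ((fun b => (x :: xs).getD ((K' + 1) * b) 0) ∘ Nat.succ) b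
            = (xs.drop K').getD ((K' + 1) * b) 0 := by
        intro b _
        have e : (K' + 1) * (b + 1) = (K' + (K' + 1) * b) + 1 := by ring
        simp only [Function.comp_apply, Nat.succ_eq_add_one, e, List.getD_cons_succ]
        rw [List.getD_eq_getElem?_getD, List.getD_eq_getElem?_getD, List.getElem?_drop]
      rw [List.map_congr_left hfun]
      rw [show xs.length / (K' + 1) = ((xs.drop K').length + (K' + 1) - 1) / (K' + 1) from hc2.symm]
      rw [ih (xs.drop K') (by rw [List.length_drop]; rw [List.length_cons] at hV; omega)]
      rw [pvStride, if_pos (Nat.zero_mod _), Nat.mul_zero, List.getD_cons_zero, zero_add]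
      rw [stride_shift (K' + 1) (Nat.succ_pos K') K' 1 (by omega) le_rfl xs]

lemma alt_eq (k n : Int) (a : List Int) (hk : 1 ≤ k) : solve_alt k n a = altArith k n a := by
  have hk0 : (0:Int) < k := hk
  have hKpos : 0 < k.toNat := by omega
  have hkk : ((k.toNat : ℕ) : Int) = k := Int.toNat_of_nonneg (by omega)
  simp only [solve_alt, altArith]
  have hbuild := build_eq k a (PySem.List.pyRange (n - 1) (-1) (-1)) [] [] 0
  simp only [List.nil_append, zero_add] at hbuild
  rw [hbuild]
  dsimp only
  set L := PySem.List.pyRange (n - 1) (-1) (-1) with hL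
  set F := rleF k a L with hF
  set P := rleP k a 0 L with hP
  set V := vflat k a L with hV
  set T := (PySem.List.pyRange 0 n 1).foldl
    (fun t i => t + PySem.Int.floordiv (PySem.List.pyGetD a i 0) k * 2 * (i + 1)) 0 with hT
  have hS0 : 0 ≤ rleS k a L := rleS_nonneg k a hk0 L
  have hSV : rleS k a L = (V.length : Int) := rleS_eq_len k a hk0 L
  have hcnt_eq : PySem.Int.floordiv (rleS k a L + k - 1) k
      = (((V.length + k.toNat - 1) / k.toNat : ℕ) : Int) := by
    rw [PySem.Int.floordiv_eq_ediv_of_pos hk0, hSV, Int.natCast_div]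
    congr 1
    · push_cast [Nat.cast_sub (show 1 ≤ V.length + k.toNat by omega)]
      rw [hkk]
    · exact hkk.symm
  have hmain : ∀ (tot : Int), ∀ bN ∈ List.range ((V.length + k.toNat - 1) / k.toNat),
      tot + 2 * PySem.List.pyGetD F
          (bsearchGo P ((bN : Int) * k) 0 ((P.length : Int) - 1)) 0
        = tot + 2 * V.getD (k.toNat * bN) 0 := by
    intro tot bN hb
    have hbN : bN < (V.length + k.toNat - 1) / k.toNat := List.mem_range.mp hb
    have ht0 : 0 ≤ (bN : Int) * k := mul_nonneg (by positivity) (by omega)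
    have htS : (bN : Int) * k < rleS k a L := by
      have h1 : (bN : Int) < (((V.length + k.toNat - 1) / k.toNat : ℕ) : Int) := by
        exact_mod_cast hbN
      rw [Int.natCast_div] at h1
      have h2 : (bN : Int) + 1 ≤ (((V.length + k.toNat - 1) : ℕ) : Int) / ((k.toNat : ℕ) : Int) := by
        omega
      have h3 := (Int.le_ediv_iff_mul_le (by exact_mod_cast hKpos)).mp h2
      have h4 : (((V.length + k.toNat - 1) : ℕ) : Int) = (V.length : Int) + ((k.toNat : ℕ) : Int) - 1 := by
        push_cast [Nat.cast_sub (show 1 ≤ V.length + k.toNat by omega)]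
        ring
      rw [h4, hkk] at h3
      rw [hSV]
      nlinarith [h3]
    obtain ⟨p, hp, htp⟩ := rleP_exists k a hk0 L 0 ((bN : Int) * k) (by omega) (by omega)
    rw [← hP] at hp
    have hps_sorted : P.Pairwise (· < ·) := rleP_sorted k a hk0 L 0
    have hps_ne : P ≠ [] := by
      intro h
      rw [h] at hp
      exact absurd hp List.not_mem_nil
    have hlen0 : 0 < P.length := List.length_pos_iff.mpr hps_ne
    obtain ⟨j, hj, hpj⟩ := List.mem_iff_getElem.mp hp
    have hlast : (bN : Int) * k < P.getD (P.length - 1) 0 := by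
      have h6 : P.getD j 0 = p := by rw [List.getD_eq_getElem P 0 hj, hpj]
      have h7 := sorted_getD_le P hps_sorted j (P.length - 1) (by omega) (by omega)
      omega
    have hlen : F.length = P.length := len_rleF_eq k a L 0
    have hb2 := bsearch_own ((bN : Int) * k) F P hlen hps_sorted
      0 ((P.length : Int) - 1)
      le_rfl (by omega) (by omega)
      (fun m hm => absurd hm (by omega))
      (by rw [show ((P.length : Int) - 1).toNat = P.length - 1 by omega]; exact hlast)
    rw [hb2]
    rw [hF, hP]
    rw [own_vflat k a hk0 L 0 ((bN : Int) * k) le_rfl (by omega) (by omega)]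
    rw [show (((bN : Int) * k) - 0).toNat = k.toNat * bN by
      rw [sub_zero, ← hkk, show (bN : Int) * ((k.toNat : ℕ) : Int) = ((bN * k.toNat : ℕ) : Int) by push_cast; ring,
          Int.toNat_natCast]
      exact Nat.mul_comm bN k.toNat]
  rw [hcnt_eq, PySem.List.pyRange_zero_nat, List.foldl_map]
  rw [PySem.List.foldl_congr_mem _ _ (fun tot bN => tot + 2 * V.getD (k.toNat * bN) 0) T hmain]
  rw [PySem.List.foldl_add]
  rw [stepB_fold_stride k a hk L 0 T le_rfl]
  rw [show ((0:Int).toNat) = 0 from rfl]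
  congr 1
  rw [show (fun bN => 2 * V.getD (k.toNat * bN) 0) = (fun bN => (2:Int) * (fun b => V.getD (k.toNat * b) 0) bN) from rfl]
  rw [List.sum_map_mul_left]
  rw [blocksum_stride k.toNat hKpos V.length V le_rfl]

-- ===== VERDICT (by name: the statement is the Claim_ definition above) =====
theorem solve_spec : Claim_equal_solve := by
  intro k n a _ hpre
  unfold Spec_solve
  rw [loop_main k n a hpre.1, alt_eq k n a hpre.1]
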